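-- pv_equiv track=rewrite | github.com/ak2k2/Checkers-Alpha-Beta-AI | game.py | player_has_capture
-- ===== SOURCE A (Python) =====
-- def player_has_capture(
--     player: str, player_positions: dict[str, set[tuple[int, int]]]
-- ) -> bool:
--     opponent = "O" if player == "X" else "X"
--
--     # Direction of possible captures based on player
--     directions = []
--     if player == "X":
--         directions = [(2, 2), (2, -2)]
--     else:  # 'O'
--         directions = [(-2, -2), (-2, 2)]
--
--     # Loop only through player's pieces
--     for row, col in player_positions[player]:
--         # Check each potential capture move
--         for drow, dcol in directions:
--             new_row, new_col = row + drow, col + dcol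
--             mid_row, mid_col = row + drow // 2, col + dcol // 2
--
--             if 0 <= new_row < 8 and 0 <= new_col < 8:
--                 if (mid_row, mid_col) in player_positions[opponent]:
--                     # Check if the destination square is empty
--                     if (new_row, new_col) not in player_positions['X'] and (new_row, new_col) not in player_positions['O']:
--                         return True
--
--     return False
-- ===== SOURCE B (Python) =====
-- def player_has_capture(
--     player: str, player_positions: dict[str, set[tuple[int, int]]]
-- ) -> bool:
--     opponent = "O" if player == "X" else "X"
--     occupied = player_positions["X"] | player_positions["O"]
--     directions = [(2, 2), (2, -2)] if player == "X" else [(-2, -2), (-2, 2)]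
--     mine = player_positions[player]
--     for drow, dcol in directions:
--         # pieces of `player` that sit two-back of an opponent piece along (drow, dcol)
--         sources = {
--             (r - drow // 2, c - dcol // 2) for (r, c) in player_positions[opponent]
--         } & mine
--         if any(
--             0 <= r + drow < 8 and 0 <= c + dcol < 8 and (r + drow, c + dcol) not in occupied
--             for (r, c) in sources
--         ):
--             return True
--     return False
-- ===== Notes on version B (the rewrite author's own statement) =====
-- stated objective: alternative
-- what changed: Replaces the per-piece scan with per-direction set algebra: sources = (opponent set translated by -(drow//2,dcol//2)) & player's set, destinations checked against a precomputed occupied = X | O union.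
-- outside the precondition, e.g. on player_has_capture('X', {'X': set()}): A returns False, B raises KeyError
import Mathlib
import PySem

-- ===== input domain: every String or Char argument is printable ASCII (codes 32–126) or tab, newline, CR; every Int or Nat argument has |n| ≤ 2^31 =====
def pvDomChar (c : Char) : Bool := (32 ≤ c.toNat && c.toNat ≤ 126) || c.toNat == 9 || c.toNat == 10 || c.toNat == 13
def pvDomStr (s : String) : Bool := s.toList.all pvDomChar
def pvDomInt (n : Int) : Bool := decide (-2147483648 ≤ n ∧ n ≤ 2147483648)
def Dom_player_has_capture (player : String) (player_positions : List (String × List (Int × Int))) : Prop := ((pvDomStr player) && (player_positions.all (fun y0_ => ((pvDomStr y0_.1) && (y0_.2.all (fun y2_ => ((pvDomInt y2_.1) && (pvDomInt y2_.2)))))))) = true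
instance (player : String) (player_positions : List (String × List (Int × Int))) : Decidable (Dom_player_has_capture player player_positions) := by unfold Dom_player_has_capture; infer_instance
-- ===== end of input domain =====

-- B replaces A's per-piece nested scan by per-direction set algebra (translate the
-- opponent set, intersect with the player's set, test destinations against a
-- precomputed occupied = X | O union); same return value on the stated domain.

-- dict[str, set[...]] lookup (first match in the association list)
def pvGetKey (player_positions : List (String × List (Int × Int))) (k : String) :
    Option (List (Int × Int)) :=
  (PySem.Dict.mk player_positions).get? k

-- ===== PORT A =====
def player_has_capture (player : String) (player_positions : List (String × List (Int × Int))) : Bool :=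
  let opponent := if player == "X" then "O" else "X"
  let directions : List (Int × Int) :=
    if player == "X" then [(2, 2), (2, -2)] else [(-2, -2), (-2, 2)]
  let mine := (pvGetKey player_positions player).getD []
  let opp := (pvGetKey player_positions opponent).getD []
  let xset := (pvGetKey player_positions "X").getD []
  let oset := (pvGetKey player_positions "O").getD []
  mine.any fun rc =>
    directions.any fun d =>
      let new_row := rc.1 + d.1
      let new_col := rc.2 + d.2
      let mid_row := rc.1 + PySem.Int.floordiv d.1 2
      let mid_col := rc.2 + PySem.Int.floordiv d.2 2
      decide (0 ≤ new_row ∧ new_row < 8 ∧ 0 ≤ new_col ∧ new_col < 8) &&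
        opp.contains (mid_row, mid_col) &&
        !(xset.contains (new_row, new_col)) && !(oset.contains (new_row, new_col))

-- ===== PORT B =====
def player_has_capture_alt (player : String) (player_positions : List (String × List (Int × Int))) : Bool :=
  let opponent := if player == "X" then "O" else "X"
  let occupied : PySem.Set (Int × Int) :=
    PySem.Set.union (PySem.Set.ofList ((pvGetKey player_positions "X").getD []))
      ((pvGetKey player_positions "O").getD [])
  let directions : List (Int × Int) :=
    if player == "X" then [(2, 2), (2, -2)] else [(-2, -2), (-2, 2)]
  let mine := (pvGetKey player_positions player).getD []
  directions.any fun d =>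
    let sources : PySem.Set (Int × Int) :=
      PySem.Set.inter
        (PySem.Set.ofList (((pvGetKey player_positions opponent).getD []).map
          (fun p => (p.1 - PySem.Int.floordiv d.1 2, p.2 - PySem.Int.floordiv d.2 2))))
        mine
    sources.any fun rc =>
      decide (0 ≤ rc.1 + d.1 ∧ rc.1 + d.1 < 8 ∧ 0 ≤ rc.2 + d.2 ∧ rc.2 + d.2 < 8) &&
        !(PySem.Set.contains occupied (rc.1 + d.1, rc.2 + d.2))

-- ===== PRECONDITION & SPEC =====
-- Pre_ excludes inputs missing any of the keys player, "X", "O": on those Python A raises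
-- KeyError (or returns only by never reaching a lazy lookup of a missing color key,
-- e.g. when its piece list is empty) and B's upfront union raises KeyError.
def Pre_player_has_capture (player : String) (player_positions : List (String × List (Int × Int))) : Prop :=
  (pvGetKey player_positions player).isSome = true ∧
  (pvGetKey player_positions "X").isSome = true ∧
  (pvGetKey player_positions "O").isSome = true
instance (player : String) (player_positions : List (String × List (Int × Int))) : Decidable (Pre_player_has_capture player player_positions) := by unfold Pre_player_has_capture; infer_instance

def pvWitness_player_has_capture : String × (List (String × List (Int × Int))) :=
  ("X", [("X", [(1, 1)]), ("O", [(2, 2)])])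

def Spec_player_has_capture (player : String) (player_positions : List (String × List (Int × Int))) (out : Bool) : Prop := out = player_has_capture_alt player player_positions
instance (player : String) (player_positions : List (String × List (Int × Int))) (out : Bool) : Decidable (Spec_player_has_capture player player_positions out) := by unfold Spec_player_has_capture; infer_instance

-- ===== CLAIM (what is proved, stated in full; the proofs are below) =====
def Claim_equal_player_has_capture : Prop := ∀ (player : String) (player_positions : List (String × List (Int × Int))), Dom_player_has_capture player player_positions → Pre_player_has_capture player player_positions → Spec_player_has_capture player player_positions (player_has_capture player player_positions)

-- ===== LEMMAS AND PROOFS =====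

-- A's scan over the player's pieces, over any direction list, finds a capture iff B's
-- per-direction scan over the translated-and-intersected source set does.
lemma full_equiv (mine opp xset oset : List (Int × Int)) (ds : List (Int × Int)) :
    (mine.any fun rc => ds.any fun d =>
      decide (0 ≤ rc.1 + d.1 ∧ rc.1 + d.1 < 8 ∧ 0 ≤ rc.2 + d.2 ∧ rc.2 + d.2 < 8) &&
        opp.contains (rc.1 + PySem.Int.floordiv d.1 2, rc.2 + PySem.Int.floordiv d.2 2) &&
        !(xset.contains (rc.1 + d.1, rc.2 + d.2)) && !(oset.contains (rc.1 + d.1, rc.2 + d.2))) =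
    (ds.any fun d =>
      (PySem.Set.inter
        (PySem.Set.ofList (opp.map
          (fun p => (p.1 - PySem.Int.floordiv d.1 2, p.2 - PySem.Int.floordiv d.2 2))))
        mine).any fun rc =>
      decide (0 ≤ rc.1 + d.1 ∧ rc.1 + d.1 < 8 ∧ 0 ≤ rc.2 + d.2 ∧ rc.2 + d.2 < 8) &&
        !(PySem.Set.contains (PySem.Set.union (PySem.Set.ofList xset) oset) (rc.1 + d.1, rc.2 + d.2))) := by
  rw [Bool.eq_iff_iff]
  simp only [List.any_eq_true, Bool.and_eq_true, Bool.not_eq_true', decide_eq_true_eq,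
    List.contains_eq_mem, decide_eq_false_iff_not,
    PySem.Set.mem_inter, PySem.Set.mem_ofList, List.mem_map,
    PySem.Set.contains_eq_listContains, PySem.Set.mem_union]
  constructor
  · rintro ⟨rc, hrc, d, hd, ⟨⟨hb, hmid⟩, hx⟩, ho⟩
    exact ⟨d, hd, rc,
      ⟨⟨(rc.1 + PySem.Int.floordiv d.1 2, rc.2 + PySem.Int.floordiv d.2 2), hmid, by simp⟩, hrc⟩,
      hb, fun h => h.elim hx ho⟩
  · rintro ⟨d, hd, rc, ⟨⟨m, hm, hmr⟩, hrc⟩, hb, hocc⟩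
    have h1 : rc.1 = m.1 - PySem.Int.floordiv d.1 2 := by rw [← hmr]
    have h2 : rc.2 = m.2 - PySem.Int.floordiv d.2 2 := by rw [← hmr]
    have hrm : (rc.1 + PySem.Int.floordiv d.1 2, rc.2 + PySem.Int.floordiv d.2 2) = m := by
      rw [h1, h2]; simp
    exact ⟨rc, hrc, d, hd, ⟨⟨hb, hrm ▸ hm⟩, fun h => hocc (Or.inl h)⟩, fun h => hocc (Or.inr h)⟩

-- ===== VERDICT (by name: the statement is the Claim_ definition above) =====
theorem player_has_capture_spec : Claim_equal_player_has_capture := by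
  intro player pp _ _
  unfold Spec_player_has_capture
  by_cases h : player == "X" <;>
   simp only [player_has_capture, player_has_capture_alt, h, Bool.false_eq_true,
      ite_false] <;>
    rw [full_equiv]
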